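-- pv_equiv track=rewrite | github.com/michaelsoltys/IAA-Code | Problems/Problem-4.23/Solution-1/problem-4.23.py | largestFinishTimes
-- ===== SOURCE A (Python) =====
-- def largestFinishTimes(result):
--     # finds indices of the largest distinct finish time no greater than the start time of activity i
--     H = []
--     for t in range(len(result)):
--         H.append(0)
--     for i in range(len(result)):
--         for j in range(len(result)):
--             if result[i][0] >= result[j][1]:
--                 H.insert(i,j+1)
--                 del(H[i+1])
--     return H
-- ===== SOURCE B (Python) =====
-- def largestFinishTimes(result):
--     # Sort (finish, index) pairs by finish time, take running max of index,
--     # then binary-search each start time: O(n log n) instead of A's O(n^2).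
--     pairs = sorted(((f, j) for j, (s, f) in enumerate(result)), key=lambda p: p[0])
--     fins = [f for f, _ in pairs]
--     pref = []
--     m = -1
--     for _, j in pairs:
--         if j > m:
--             m = j
--         pref.append(m)
--     out = []
--     for s, _ in result:
--         lo, hi = 0, len(fins)
--         while lo < hi:
--             mid = (lo + hi) // 2
--             if fins[mid] <= s:
--                 lo = mid + 1
--             else:
--                 hi = mid
--         out.append(pref[lo - 1] + 1 if lo > 0 else 0)
--     return out
-- ===== Notes on version B (the rewrite author's own statement) =====
-- stated objective: faster
-- what changed: A's nested double scan (for each activity, rescan all finish times, overwriting H[i] via insert+del) is replaced by sorting (finish, index) pairs once, taking a running maximum of indices, and binary-searching each start time.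
import Mathlib
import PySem

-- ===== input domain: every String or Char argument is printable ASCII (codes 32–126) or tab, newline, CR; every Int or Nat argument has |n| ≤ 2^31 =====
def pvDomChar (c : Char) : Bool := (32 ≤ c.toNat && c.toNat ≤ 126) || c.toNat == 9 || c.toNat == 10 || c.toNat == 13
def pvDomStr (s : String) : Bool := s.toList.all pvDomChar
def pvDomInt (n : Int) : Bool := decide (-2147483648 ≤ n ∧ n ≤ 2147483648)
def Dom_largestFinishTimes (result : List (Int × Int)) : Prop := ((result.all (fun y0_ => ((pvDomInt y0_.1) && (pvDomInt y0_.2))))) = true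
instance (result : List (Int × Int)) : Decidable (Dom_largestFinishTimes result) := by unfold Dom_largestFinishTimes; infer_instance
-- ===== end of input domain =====

-- B replaces A's O(n^2) double scan by sort + running max + binary search (O(n log n)); return values are identical.

-- ===== PORT A =====
-- literal port of A: H = n zeros, then for each i, for each j, if start_i >= finish_j
-- do H.insert(i, j+1) followed by del H[i+1] (the index is always in range, so the
-- `none` branch of pop? is unreachable).
def largestFinishTimes (result : List (Int × Int)) : List Int :=
  let H : List Int := (PySem.List.pyRange 0 (result.length : Int)).foldl
      (fun H _ => H ++ [(0 : Int)]) []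
  (PySem.List.pyRange 0 (result.length : Int)).foldl (fun H i =>
    (PySem.List.pyRange 0 (result.length : Int)).foldl (fun H j =>
      if (PySem.List.pyGetD result i ((0 : Int), (0 : Int))).1 ≥
         (PySem.List.pyGetD result j ((0 : Int), (0 : Int))).2 then
        let H1 := PySem.List.insert H i (j + 1)
        match PySem.List.pop? H1 (i + 1) with
        | some r => r.2
        | none => H1
      else H) H) H

-- ===== PORT B =====
-- the hand-written while-loop binary search of Source B (bisect_right); fins[mid] is
-- always in range when lo < hi, so pyGetD's default is never used.
def bsLoop (fins : List Int) (s lo hi : Int) : Int :=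
  if _h : lo < hi then
    if PySem.List.pyGetD fins (PySem.Int.floordiv (lo + hi) 2) 0 ≤ s then
      bsLoop fins s (PySem.Int.floordiv (lo + hi) 2 + 1) hi
    else
      bsLoop fins s lo (PySem.Int.floordiv (lo + hi) 2)
  else lo
termination_by (hi - lo).toNat
decreasing_by
  · have h1 := PySem.Int.floordiv_two_mid_bounds (le_of_lt _h)
    omega
  · have h2 : PySem.Int.floordiv (lo + hi) 2 < hi := by
      rw [PySem.Int.floordiv_lt_iff_lt_mul (by norm_num)]; omega
    have h1 := PySem.Int.floordiv_two_mid_bounds (le_of_lt _h)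
    omega

def largestFinishTimes_alt (result : List (Int × Int)) : List Int :=
  let pairs := PySem.List.sorted
      ((PySem.List.enumerate result).map (fun q => (q.2.2, q.1))) (fun p => p.1)
  let fins := pairs.map (fun p => p.1)
  let pref := (pairs.foldl (fun (st : Int × List Int) p =>
      let m := if p.2 > st.1 then p.2 else st.1
      (m, st.2 ++ [m])) ((-1 : Int), ([] : List Int))).2
  result.foldl (fun out q =>
    let lo := bsLoop fins q.1 0 (fins.length : Int)
    out ++ [if lo > 0 then PySem.List.pyGetD pref (lo - 1) 0 + 1 else 0]) []

-- ===== PRECONDITION & SPEC =====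
def Spec_largestFinishTimes (result : List (Int × Int)) (out : List Int) : Prop := out = largestFinishTimes_alt result
instance (result : List (Int × Int)) (out : List Int) : Decidable (Spec_largestFinishTimes result out) := by unfold Spec_largestFinishTimes; infer_instance

-- ===== CLAIM (what is proved, stated in full; the proofs are below) =====
def Claim_equal_largestFinishTimes : Prop := ∀ (result : List (Int × Int)), Dom_largestFinishTimes result → Spec_largestFinishTimes result (largestFinishTimes result)

-- ===== LEMMAS AND PROOFS =====

-- the activities finishing no later than s, in index order, with their (0-based) indices
def pvF (result : List (Int × Int)) (s : Int) : List (Int × (Int × Int)) :=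
  (PySem.List.enumerate result).filter (fun q => decide (q.2.2 ≤ s))

-- the common value of both programs at an activity with start time s
def pvAval (result : List (Int × Int)) (s : Int) : Int :=
  (pvF result s).foldl (fun acc q => q.1 + 1) 0

-- ---- generic folding lemmas ----

lemma foldl_last_fun {α : Type} (g : α → Int) :
    ∀ (l : List α) (c : Int) (h : l ≠ []),
      l.foldl (fun _ q => g q) c = g (l.getLast h) := by
  intro l c h
  conv_lhs => rw [← List.dropLast_concat_getLast h]
  rw [List.foldl_append]
  rfl

lemma foldl_max_le (x : Int) : ∀ (l : List Int) (a : Int), a ≤ x → (∀ y ∈ l, y ≤ x) →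
    l.foldl max a ≤ x := by
  intro l
  induction l with
  | nil => intro a ha _; simpa using ha
  | cons b t ih =>
    intro a ha hm
    simpa using ih (max a b) (by
      have := hm b (by simp); omega) (fun y hy => hm y (by simp [hy]))

lemma foldl_max_last (l : List Int) (a : Int) (h : l ≠ [])
    (hmax : ∀ y ∈ l, y ≤ l.getLast h) (ha : a ≤ l.getLast h) :
    l.foldl max a = l.getLast h := by
  conv_lhs => rw [← List.dropLast_concat_getLast h]
  rw [List.foldl_append]
  have hle : l.dropLast.foldl max a ≤ l.getLast h := by
    refine foldl_max_le _ _ _ ha ?_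
    intro y hy
    exact hmax y (List.dropLast_subset l hy)
  simp [List.foldl]
  omega

-- ---- A-side characterisation ----

-- H.insert(i, j+1) ; del H[i+1]  =  H[i] = j+1
lemma insert_pop_eq_set (H : List Int) (i : Nat) (hi : i < H.length) (v : Int) :
    (match PySem.List.pop? (PySem.List.insert H (i : Int) v) ((i : Int) + 1) with
      | some r => r.2
      | none => PySem.List.insert H (i : Int) v) = H.set i v := by
  rw [PySem.List.insert_natCast H i v (le_of_lt hi)]
  have hlen : i + 1 < (List.take i H ++ v :: List.drop i H).length := by
    simp; omega
  have : ((i : Int) + 1) = ((i + 1 : Nat) : Int) := by push_cast; ring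
  rw [this, PySem.List.pop?_natCast _ (i + 1) hlen]
  have htk : (List.take i H).length = i := by simp; omega
  rw [List.eraseIdx_append_of_length_le (by omega)]
  rw [List.set_eq_take_append_cons_drop, if_pos hi]
  have h1 : (i + 1) - (List.take i H).length = 1 := by omega
  rw [h1]
  simp [List.eraseIdx_cons_succ]

-- the inner j-loop only rewrites position i
lemma inner_fold_set (result : List (Int × Int)) (s : Int) :
    ∀ (js : List Int) (H : List Int) (i : Nat), i < H.length →
      js.foldl (fun H j =>
        if s ≥ (PySem.List.pyGetD result j ((0 : Int), (0 : Int))).2 then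
          let H1 := PySem.List.insert H (i : Int) (j + 1)
          match PySem.List.pop? H1 ((i : Int) + 1) with
          | some r => r.2
          | none => H1
        else H) H
      = H.set i (js.foldl (fun acc j =>
          if s ≥ (PySem.List.pyGetD result j ((0 : Int), (0 : Int))).2 then j + 1 else acc)
          (H.getD i 0)) := by
  intro js
  induction js with
  | nil =>
    intro H i hi
    simp only [List.foldl_nil]
    rw [List.getD_eq_getElem _ _ hi, List.set_getElem_self]
  | cons j t ih =>
    intro H i hi
    simp only [List.foldl_cons]
    by_cases hc : s ≥ (PySem.List.pyGetD result j ((0 : Int), (0 : Int))).2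
    · rw [if_pos hc, if_pos hc]
      show (t.foldl _ (match PySem.List.pop? (PySem.List.insert H (i : Int) (j + 1)) ((i : Int) + 1) with
          | some r => r.2
          | none => PySem.List.insert H (i : Int) (j + 1))) = _
      rw [insert_pop_eq_set H i hi (j + 1)]
      rw [ih (H.set i (j + 1)) i (by simpa using hi)]
      rw [List.set_set]
      congr 1
      rw [List.getD_eq_getElem _ _ (by simpa using hi), List.getElem_set_self]
    · rw [if_neg hc, if_neg hc]
      exact ih H i hi

-- ---- proofs get assembled below ----

-- the value A's inner loop (over the index list js) leaves at position i
def pvW (result : List (Int × Int)) (js : List Int) (i : Int) : Int :=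
  js.foldl
    (fun acc j => if (PySem.List.pyGetD result i ((0 : Int), (0 : Int))).1 ≥
        (PySem.List.pyGetD result j ((0 : Int), (0 : Int))).2 then j + 1 else acc) 0

lemma outer_inv (result : List (Int × Int)) (js : List Int) :
    ∀ t, t ≤ result.length →
      ((List.range t).foldl (fun H (i : Nat) =>
        js.foldl (fun H j =>
          if (PySem.List.pyGetD result (i : Int) ((0 : Int), (0 : Int))).1 ≥
             (PySem.List.pyGetD result j ((0 : Int), (0 : Int))).2 then
            let H1 := PySem.List.insert H (i : Int) (j + 1)
            match PySem.List.pop? H1 ((i : Int) + 1) with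
            | some r => r.2
            | none => H1
          else H) H) (List.replicate result.length (0 : Int)))
      = (List.range t).map (fun k : Nat => pvW result js (k : Int)) ++
          List.replicate (result.length - t) (0 : Int) := by
  intro t
  induction t with
  | zero => simp
  | succ t ih =>
    intro h
    rw [List.range_succ, List.foldl_append, ih (by omega)]
    simp only [List.foldl_cons, List.foldl_nil]
    have hlen : ((List.range t).map (fun k : Nat => pvW result js (k : Int)) ++
        List.replicate (result.length - t) (0 : Int)).length = result.length := by
      simp; omega
    have ht : t < ((List.range t).map (fun k : Nat => pvW result js (k : Int)) ++
        List.replicate (result.length - t) (0 : Int)).length := by omega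
    rw [inner_fold_set result _ _ _ t ht]
    have hget : ((List.range t).map (fun k : Nat => pvW result js (k : Int)) ++
        List.replicate (result.length - t) (0 : Int)).getD t 0 = 0 := by
      rw [List.getD_eq_getElem _ _ ht, List.getElem_append_right (by simp)]
      simp
    rw [hget]
    rw [List.set_append_right _ _ (by simp)]
    have hrep : List.replicate (result.length - t) (0 : Int)
        = 0 :: List.replicate (result.length - (t + 1)) (0 : Int) := by
      have h2 : result.length - t = (result.length - (t + 1)) + 1 := by omega
      rw [h2, List.replicate_succ]
    rw [hrep]
    simp [pvW, List.map_append]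

lemma pvW_eq (result : List (Int × Int)) (i : Nat) (hi : i < result.length) :
    pvW result (List.map (fun k : Nat => (k : Int)) (List.range result.length)) (i : Int)
      = pvAval result ((result[i]).1) := by
  unfold pvW pvAval pvF
  rw [List.foldl_filter]
  rw [PySem.List.enumerate_eq_map_pyRange result ((0 : Int), (0 : Int))]
  rw [List.foldl_map]
  have hlen : PySem.List.len result = (result.length : Int) := by
    simp [PySem.List.len]
  rw [hlen, PySem.List.pyRange_zero_natCast, List.foldl_map, List.foldl_map]
  have hs : (PySem.List.pyGetD result (i : Int) ((0 : Int), (0 : Int))).1 = (result[i]).1 := by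
    rw [PySem.List.pyGetD_natCast, List.getD_eq_getElem _ _ hi]
  refine PySem.List.foldl_congr_mem _ _ _ _ ?_
  intro acc j _
  rw [hs]
  by_cases hc : (PySem.List.pyGetD result j ((0 : Int), (0 : Int))).2 ≤ (result[i]).1
  · rw [if_pos hc, if_pos (by simpa using hc)]
  · rw [if_neg hc, if_neg (by simpa using hc)]

theorem largestFinishTimes_A_char (result : List (Int × Int)) :
    largestFinishTimes result = result.map (fun p => pvAval result p.1) := by
  have hrange : PySem.List.pyRange 0 (result.length : Int)
      = List.map (fun k : Nat => (k : Int)) (List.range result.length) :=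
    PySem.List.pyRange_zero_natCast _
  have hH0 : (PySem.List.pyRange 0 (result.length : Int)).foldl
      (fun H _ => H ++ [(0 : Int)]) [] = List.replicate result.length (0 : Int) := by
    rw [hrange, PySem.List.foldl_append_singleton_eq_map (fun _ => (0 : Int))]
    simp [Function.comp_def, List.map_const']
  show (PySem.List.pyRange 0 (result.length : Int)).foldl _
      ((PySem.List.pyRange 0 (result.length : Int)).foldl (fun H _ => H ++ [(0 : Int)]) []) = _
  rw [hH0]
  rw [hrange]
  rw [List.foldl_map]
  rw [outer_inv result _ result.length le_rfl]
  simp only [Nat.sub_self, List.replicate_zero, List.append_nil]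
  apply List.ext_getElem
  · simp
  · intro n h1 h2
    simp only [List.getElem_map, List.getElem_range]
    rw [pvW_eq result n (by simpa using h1)]

-- ---- B-side characterisation ----

def pvPairs (result : List (Int × Int)) : List (Int × Int) :=
  PySem.List.sorted ((PySem.List.enumerate result).map (fun q => (q.2.2, q.1))) (fun p => p.1)

def pvFins (result : List (Int × Int)) : List Int :=
  (pvPairs result).map (fun p => p.1)

def pvPref (result : List (Int × Int)) : List Int :=
  ((pvPairs result).foldl (fun (st : Int × List Int) p =>
      let m := if p.2 > st.1 then p.2 else st.1
      (m, st.2 ++ [m])) ((-1 : Int), ([] : List Int))).2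

def pvBval (result : List (Int × Int)) (s : Int) : Int :=
  if bsLoop (pvFins result) s 0 ((pvFins result).length : Int) > 0 then
    PySem.List.pyGetD (pvPref result)
      (bsLoop (pvFins result) s 0 ((pvFins result).length : Int) - 1) 0 + 1
  else 0

lemma bsLoop_spec (fins : List Int) (s : Int)
    (hmono : ∀ (p q : Nat) (hp : p < fins.length) (hq : q < fins.length),
      p ≤ q → fins[p] ≤ fins[q]) :
    ∀ (n : Nat) (lo hi : Int), (hi - lo).toNat ≤ n → 0 ≤ lo → lo ≤ hi → hi ≤ (fins.length : Int) →
    (∀ (j : Nat) (hj : j < fins.length), (j : Int) < lo → fins[j] ≤ s) →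
    (∀ (j : Nat) (hj : j < fins.length), hi ≤ (j : Int) → s < fins[j]) →
    lo ≤ bsLoop fins s lo hi ∧ bsLoop fins s lo hi ≤ hi ∧
    (∀ (j : Nat) (hj : j < fins.length), (j : Int) < bsLoop fins s lo hi → fins[j] ≤ s) ∧
    (∀ (j : Nat) (hj : j < fins.length), bsLoop fins s lo hi ≤ (j : Int) → s < fins[j]) := by
  intro n
  induction n with
  | zero =>
    intro lo hi hfuel h0 hlh hhi hbelow habove
    have hle : hi ≤ lo := by omega
    rw [bsLoop, dif_neg (by omega)]
    refine ⟨le_rfl, by omega, hbelow, fun j hj hge => habove j hj (by omega)⟩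
  | succ n ih =>
    intro lo hi hfuel h0 hlh hhi hbelow habove
    by_cases hlt : lo < hi
    · rw [bsLoop, dif_pos hlt]
      have hmid := PySem.Int.floordiv_two_mid_bounds (le_of_lt hlt)
      have hmidlt : PySem.Int.floordiv (lo + hi) 2 < hi := by
        rw [PySem.Int.floordiv_lt_iff_lt_mul (by norm_num)]; omega
      generalize hMg : PySem.Int.floordiv (lo + hi) 2 = m at hmid hmidlt ⊢
      have hm0 : 0 ≤ m := by omega
      have hmlen : m.toNat < fins.length := by omega
      have hgetm : PySem.List.pyGetD fins m 0 = fins[m.toNat] := by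
        rw [PySem.List.pyGetD_of_nonneg _ _ hm0, List.getD_eq_getElem _ _ hmlen]
      by_cases hc : PySem.List.pyGetD fins m 0 ≤ s
      · rw [if_pos hc]
        have hres := ih (m + 1) hi (by omega) (by omega) (by omega) hhi
          (fun j hj hjlt => by
            have hjm : j ≤ m.toNat := by omega
            exact le_trans (hmono j m.toNat hj hmlen hjm) (by rw [hgetm] at hc; exact hc))
          habove
        exact ⟨by omega, hres.2.1, hres.2.2.1, hres.2.2.2⟩
      · rw [if_neg hc]
        rw [not_le] at hc
        rw [hgetm] at hc
        have hres := ih lo m (by omega) h0 (by omega) (by omega) hbelow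
          (fun j hj hge => lt_of_lt_of_le hc (hmono m.toNat j hmlen hj (by omega)))
        exact ⟨hres.1, by omega, hres.2.2.1, hres.2.2.2⟩
    · rw [bsLoop, dif_neg hlt]
      refine ⟨le_rfl, by omega, hbelow, fun j hj hge => habove j hj (by omega)⟩

lemma scan_snd :
    ∀ (l : List (Int × Int)) (m0 : Int) (acc : List Int),
      (l.foldl (fun (st : Int × List Int) p =>
        let m := if p.2 > st.1 then p.2 else st.1
        (m, st.2 ++ [m])) (m0, acc)).2
      = acc ++ (List.range l.length).map
          (fun t => ((l.take (t + 1)).map (fun p => p.2)).foldl max m0) := by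
  intro l
  induction l with
  | nil => simp
  | cons p l ih =>
    intro m0 acc
    simp only [List.foldl_cons]
    rw [ih]
    have hm1 : (if p.2 > m0 then p.2 else m0) = max m0 p.2 := by
      rw [max_def]; split_ifs <;> omega
    simp only [List.length_cons, List.range_succ_eq_map, List.map_cons, List.map_map,
      List.take_succ_cons, List.map_cons, List.foldl_cons, hm1]
    simp [Function.comp_def, List.append_assoc]

lemma pvBval_eq (result : List (Int × Int)) (s : Int) :
    pvBval result s = pvAval result s := by
  have hflen : (pvFins result).length = (pvPairs result).length := by
    simp [pvFins]
  have hpw : List.Pairwise (fun a b : Int => a ≤ b) (pvFins result) :=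
    List.Pairwise.map _ (fun a b h => h)
      (PySem.List.sorted_pairwise ((PySem.List.enumerate result).map (fun q => (q.2.2, q.1)))
        (fun p => p.1))
  have hmono : ∀ (p q : Nat) (hp : p < (pvFins result).length)
      (hq : q < (pvFins result).length), p ≤ q →
      (pvFins result)[p] ≤ (pvFins result)[q] := by
    intro p q hp hq hpq
    rcases Nat.lt_or_ge p q with h | h
    · exact List.pairwise_iff_getElem.mp hpw p q hp hq h
    · have : p = q := by omega
      subst this; exact le_rfl
  obtain ⟨hk0, hkhi, hle, hgt⟩ := bsLoop_spec (pvFins result) s hmono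
    ((pvFins result).length : Int).toNat 0 ((pvFins result).length : Int) (by omega)
    le_rfl (by positivity) le_rfl
    (fun j hj hlt => absurd hlt (by omega))
    (fun j hj hge => absurd hge (by omega))
  set k := bsLoop (pvFins result) s 0 ((pvFins result).length : Int) with hkdef
  set K := k.toNat with hKdef
  have hKk : (K : Int) = k := Int.toNat_of_nonneg hk0
  have hKlen : K ≤ (pvPairs result).length := by
    rw [← hflen]; omega
  have htake : (pvPairs result).take K
      = (pvPairs result).filter (fun p => decide (p.1 ≤ s)) := by
    conv_rhs => rw [← List.take_append_drop K (pvPairs result)]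
    rw [List.filter_append]
    have h1 : List.filter (fun p => decide (p.1 ≤ s)) ((pvPairs result).take K)
        = (pvPairs result).take K := by
      rw [List.filter_eq_self]
      intro a ha
      obtain ⟨j, hj, rfl⟩ := List.mem_iff_getElem.mp ha
      have hjK : j < K := by
        have := hj; simp [List.length_take] at this; omega
      have hjlen : j < (pvFins result).length := by
        simp [List.length_take] at hj; omega
      have := hle j hjlen (by omega)
      rw [List.getElem_take]
      simp only [decide_eq_true_eq]
      have hfj : (pvFins result)[j] = ((pvPairs result)[j]'(by omega)).1 := by
        simp [pvFins]
      rw [hfj] at this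
      exact this
    have h2 : List.filter (fun p => decide (p.1 ≤ s)) ((pvPairs result).drop K) = [] := by
      rw [List.filter_eq_nil_iff]
      intro a ha
      obtain ⟨j, hj, rfl⟩ := List.mem_iff_getElem.mp ha
      rw [List.getElem_drop]
      have hjlen : K + j < (pvFins result).length := by
        simp at hj; omega
      have := hgt (K + j) hjlen (by push_cast; omega)
      have hfj : (pvFins result)[K + j] = ((pvPairs result)[K + j]'(by omega)).1 := by
        simp [pvFins]
      rw [hfj] at this
      simp only [decide_eq_true_eq]
      omega
    rw [h1, h2, List.append_nil]
  have hpermL : (pvPairs result).Perm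
      ((PySem.List.enumerate result).map (fun q => (q.2.2, q.1))) :=
    PySem.List.sorted_perm _ _ _
  have hpermF : ((pvPairs result).filter (fun p => decide (p.1 ≤ s))).Perm
      ((pvF result s).map (fun q => (q.2.2, q.1))) := by
    have h := hpermL.filter (fun p => decide (p.1 ≤ s))
    rw [List.filter_map] at h
    have hpred : ((fun p : Int × Int => decide (p.1 ≤ s)) ∘ (fun q : Int × (Int × Int) => (q.2.2, q.1)))
        = (fun q : Int × (Int × Int) => decide (q.2.2 ≤ s)) := rfl
    rw [hpred] at h
    exact h
  have hlenF : K = (pvF result s).length := by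
    have h1 : ((pvPairs result).take K).length = K := by
      simp; omega
    have h2 := (htake ▸ hpermF).length_eq
    rw [h1] at h2
    simpa using h2
  by_cases hkpos : k > 0
  · have hKpos : 0 < K := by omega
    have hFne : pvF result s ≠ [] := by
      intro hnil
      rw [hnil] at hlenF
      simp at hlenF
      omega
    rw [pvBval, if_pos hkpos]
    have hpref : pvPref result = (List.range (pvPairs result).length).map
        (fun t => (((pvPairs result).take (t + 1)).map (fun p => p.2)).foldl max (-1)) := by
      rw [pvPref, scan_snd]
      simp
    have hK1 : (k - 1).toNat = K - 1 := by omega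
    have hK1lt : K - 1 < (pvPairs result).length := by omega
    rw [PySem.List.pyGetD_of_nonneg _ _ (by omega), hK1, hpref,
      List.getD_eq_getElem _ _ (by simpa using hK1lt)]
    simp only [List.getElem_map, List.getElem_range]
    have hK1' : (K - 1) + 1 = K := by omega
    rw [hK1']
    -- permutation to the filtered enumerate side
    have hpermSnd : (((pvPairs result).take K).map (fun p => p.2)).Perm
        ((pvF result s).map (fun q => q.1)) := by
      have h := (htake ▸ hpermF).map (fun p : Int × Int => p.2)
      rw [List.map_map] at h
      exact h
    rw [hpermSnd.foldl_eq (-1)]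
    -- the filtered enumerate list is strictly increasing in its first components
    have hFpw : (pvF result s).Pairwise (fun p q => p.1 < q.1) :=
      (PySem.List.pairwise_lt_enumerate result 0).filter _
    have hFmapne : (pvF result s).map (fun q => q.1) ≠ [] := by
      simpa using hFne
    have hlast : ((pvF result s).map (fun q => q.1)).getLast hFmapne
        = ((pvF result s).getLast hFne).1 := List.getLast_map _
    have hnonneg : 0 ≤ ((pvF result s).getLast hFne).1 := by
      have hmem : (pvF result s).getLast hFne ∈ pvF result s := List.getLast_mem _
      have hmem' : (pvF result s).getLast hFne ∈ PySem.List.enumerate result :=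
        List.mem_of_mem_filter hmem
      obtain ⟨κ, hκ, heq⟩ := (PySem.List.mem_enumerate_iff _ _ _).mp hmem'
      rw [heq]; simp
    have hmax : ∀ y ∈ (pvF result s).map (fun q => q.1),
        y ≤ ((pvF result s).map (fun q => q.1)).getLast hFmapne := by
      intro y hy
      have hpwm : ((pvF result s).map (fun q => q.1)).Pairwise (fun a b : Int => a < b) :=
        List.Pairwise.map _ (fun a b h => h) hFpw
      obtain ⟨j, hj, rfl⟩ := List.mem_iff_getElem.mp hy
      rw [List.getLast_eq_getElem]
      rcases Nat.lt_or_ge j (((pvF result s).map (fun q => q.1)).length - 1) with h | h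
      · exact le_of_lt (List.pairwise_iff_getElem.mp hpwm j _ hj (by omega) h)
      · have : j = ((pvF result s).map (fun q => q.1)).length - 1 := by omega
        subst this; exact le_rfl
    rw [foldl_max_last _ _ hFmapne hmax (by rw [hlast]; omega)]
    rw [hlast]
    rw [pvAval, foldl_last_fun (fun q => q.1 + 1) (pvF result s) 0 hFne]
  · have hK0 : K = 0 := by omega
    have hFnil : pvF result s = [] := by
      have := hlenF
      rw [hK0] at this
      exact (List.length_eq_zero_iff.mp this.symm)
    rw [pvBval, if_neg hkpos, pvAval, hFnil]
    rfl

theorem largestFinishTimes_B_char (result : List (Int × Int)) :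
    largestFinishTimes_alt result = result.map (fun p => pvAval result p.1) := by
  have h0 : largestFinishTimes_alt result
      = result.foldl (fun out q => out ++ [pvBval result q.1]) [] := rfl
  rw [h0, PySem.List.foldl_append_singleton_eq_map (fun q : Int × Int => pvBval result q.1)]
  simp only [List.nil_append]
  simp [pvBval_eq]

-- ===== VERDICT (by name: the statement is the Claim_ definition above) =====
theorem largestFinishTimes_spec : Claim_equal_largestFinishTimes := by
  intro result _
  unfold Spec_largestFinishTimes
  rw [largestFinishTimes_A_char, largestFinishTimes_B_char]
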